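-- pv_equiv track=rewrite | github.com/StevenL2017/LeetCode | python_template/stack.py | min_range
-- ===== SOURCE A (Python) =====
-- def min_range(nums):
--     n = len(nums)
--     stack = []
--     left, right = [-1] * n, [n] * n
--     for i in range(n):
--         while stack and nums[i] <= nums[stack[-1]]:
--             right[stack.pop()] = i
--         if stack:
--             left[i] = stack[-1]
--         stack.append(i)
--     return left, right
-- ===== SOURCE B (Python) =====
-- def min_range(nums):
--     n = len(nums)
--     left = []
--     for i in range(n):
--         l = -1
--         for j in range(i - 1, -1, -1):
--             if nums[j] < nums[i]:
--                 l = j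
--                 break
--         left.append(l)
--     right = []
--     for i in range(n):
--         r = n
--         for j in range(i + 1, n):
--             if nums[j] <= nums[i]:
--                 r = j
--                 break
--         right.append(r)
--     return left, right
-- ===== Notes on version B (the rewrite author's own statement) =====
-- stated objective: alternative
-- what changed: Replaces the single interleaved monotonic-stack pass (which fills left and right simultaneously while popping) by two independent direct scans: for each i, left[i] scans backwards for the first j with nums[j] < nums[i], and right[i] scans forwards for the first j with nums[j] <= nums[i].
import Mathlib
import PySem

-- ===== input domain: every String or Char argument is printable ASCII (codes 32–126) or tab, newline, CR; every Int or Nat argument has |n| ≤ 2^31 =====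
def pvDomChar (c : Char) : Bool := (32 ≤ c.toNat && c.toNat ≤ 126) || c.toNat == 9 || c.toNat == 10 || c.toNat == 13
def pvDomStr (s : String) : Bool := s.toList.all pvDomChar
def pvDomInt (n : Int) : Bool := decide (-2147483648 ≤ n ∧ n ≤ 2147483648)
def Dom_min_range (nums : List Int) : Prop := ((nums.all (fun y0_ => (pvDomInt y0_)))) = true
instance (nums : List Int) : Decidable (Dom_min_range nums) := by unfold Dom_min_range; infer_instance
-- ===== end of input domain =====

-- B replaces A's single interleaved monotonic-stack pass by two independent direct scans
-- (first smaller element to the left, first ≤ element to the right); alternative decomposition, not faster.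

-- ===== PORT A =====
-- the inner `while stack and nums[i] <= nums[stack[-1]]: right[stack.pop()] = i`
-- (stack is kept head-first: Lean head = Python stack[-1]; all indices are in range, so getD is exact)
def pvPopA (nums : List Int) (i : Nat) : List Nat → List Int → List Nat × List Int
  | [], right => ([], right)
  | t :: rest, right =>
    if nums.getD i 0 ≤ nums.getD t 0 then pvPopA nums i rest (right.set t (i : Int))
    else (t :: rest, right)

-- one iteration of A's `for i in range(n)` body, state = (stack, left, right)
def pvStepA (nums : List Int) (st : List Nat × List Int × List Int) (i : Nat) :
    List Nat × List Int × List Int :=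
  let pr := pvPopA nums i st.1 st.2.2
  let left := match pr.1 with
    | t :: _ => st.2.1.set i (t : Int)
    | [] => st.2.1
  (i :: pr.1, left, pr.2)

def min_range (nums : List Int) : List Int × List Int :=
  let n := nums.length
  let st := (List.range n).foldl (pvStepA nums)
    ([], List.replicate n (-1 : Int), List.replicate n (n : Int))
  (st.2.1, st.2.2)

-- ===== PORT B =====
-- `for j in range(i-1,-1,-1): if nums[j] < v: l = j; break` — returns first hit, else -1
def pvScanLt (nums : List Int) (v : Int) : List Nat → Int
  | [] => -1
  | j :: js => if nums.getD j 0 < v then (j : Int) else pvScanLt nums v js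

-- `for j in range(i+1,n): if nums[j] <= v: r = j; break` — returns first hit, else n
def pvScanLe (nums : List Int) (v : Int) (n : Nat) : List Nat → Int
  | [] => (n : Int)
  | j :: js => if nums.getD j 0 ≤ v then (j : Int) else pvScanLe nums v n js

def min_range_alt (nums : List Int) : List Int × List Int :=
  let n := nums.length
  ((List.range n).map (fun i => pvScanLt nums (nums.getD i 0) (List.range i).reverse),
   (List.range n).map (fun i => pvScanLe nums (nums.getD i 0) n (List.range' (i+1) (n - (i+1)))))

-- ===== PRECONDITION & SPEC =====
def Spec_min_range (nums : List Int) (out : List Int × List Int) : Prop := out = min_range_alt nums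
instance (nums : List Int) (out : List Int × List Int) : Decidable (Spec_min_range nums out) := by unfold Spec_min_range; infer_instance

-- ===== CLAIM (what is proved, stated in full; the proofs are below) =====
def Claim_equal_min_range : Prop := ∀ (nums : List Int), Dom_min_range nums → Spec_min_range nums (min_range nums)

-- ===== LEMMAS AND PROOFS =====

-- keep nums i j: no index k with j < k < i has nums[k] ≤ nums[j] (i.e. j is still on A's stack at time i)
def pvKeep (nums : List Int) (i j : Nat) : Bool :=
  (List.range' (j+1) (i - (j+1))).all (fun k => decide (nums.getD j 0 < nums.getD k 0))

def pvStack (nums : List Int) (i : Nat) : List Nat :=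
  ((List.range i).filter (pvKeep nums i)).reverse

def pvL (nums : List Int) (i j : Nat) : Int :=
  if j < i then pvScanLt nums (nums.getD j 0) (List.range j).reverse else -1

def pvR (nums : List Int) (i j : Nat) : Int :=
  pvScanLe nums (nums.getD j 0) nums.length (List.range' (j+1) (i - (j+1)))

theorem scanLt_eq (nums : List Int) (v : Int) (js : List Nat) :
    pvScanLt nums v js =
      (match js.find? (fun j => decide (nums.getD j 0 < v)) with
       | some j => (j : Int) | none => -1) := by
  induction js with
  | nil => rfl
  | cons j js ih =>
    by_cases h : nums.getD j 0 < v
    · simp only [pvScanLt, List.find?, decide_eq_true h, if_pos h]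
    · simp only [pvScanLt, List.find?, decide_eq_false h, if_neg h, ih]

theorem scanLe_eq (nums : List Int) (v : Int) (n : Nat) (js : List Nat) :
    pvScanLe nums v n js =
      (match js.find? (fun j => decide (nums.getD j 0 ≤ v)) with
       | some j => (j : Int) | none => (n : Int)) := by
  induction js with
  | nil => rfl
  | cons j js ih =>
    by_cases h : nums.getD j 0 ≤ v
    · simp only [pvScanLe, List.find?, decide_eq_true h, if_pos h]
    · simp only [pvScanLe, List.find?, decide_eq_false h, if_neg h, ih]

theorem find?_filter' {α : Type} (p q : α → Bool) (l : List α) :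
    (l.filter q).find? p = l.find? fun a => q a && p a := by
  induction l with
  | nil => rfl
  | cons a l ih =>
    by_cases h : q a
    · by_cases h2 : p a <;> simp [List.find?, h, h2, ih]
    · simp [List.find?, h, ih]

theorem map_range_getD (f : Nat → Int) (n m : Nat) :
    ((List.range n).map f).getD m 0 = if m < n then f m else 0 := by
  by_cases h : m < n
  · rw [if_pos h, List.getD_eq_getElem _ _ (by simpa using h)]
    simp
  · rw [if_neg h, List.getD_eq_default _ _ (by simpa using h)]

theorem list_eq_of_getD (l1 l2 : List Int) (hlen : l1.length = l2.length)
    (h : ∀ m, l1.getD m 0 = l2.getD m 0) : l1 = l2 := by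
  apply List.ext_getElem hlen
  intro m h1 h2
  rw [← List.getD_eq_getElem l1 0 h1, ← List.getD_eq_getElem l2 0 h2, h]

theorem keep_succ (nums : List Int) {i j : Nat} (hj : j < i) :
    pvKeep nums (i+1) j = (pvKeep nums i j && decide (nums.getD j 0 < nums.getD i 0)) := by
  unfold pvKeep
  have h1 : (i+1) - (j+1) = (i - (j+1)) + 1 := by omega
  have h2 : (j+1) + (i - (j+1)) = i := by omega
  rw [h1, List.range'_1_concat, h2, List.all_append]
  simp

theorem mem_stack (nums : List Int) (i m : Nat) :
    m ∈ pvStack nums i ↔ m < i ∧ pvKeep nums i m = true := by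
  simp [pvStack, List.mem_filter]

theorem pairwise_stack (nums : List Int) (i : Nat) :
    (pvStack nums i).Pairwise (fun a b => nums.getD b 0 < nums.getD a 0) := by
  unfold pvStack
  rw [List.pairwise_reverse]
  have hbase : ((List.range i).filter (pvKeep nums i)).Pairwise (· < ·) :=
    (List.pairwise_lt_range).filter _
  refine hbase.imp_of_mem ?_
  intro a b ha hb hab
  rw [List.mem_filter, List.mem_range] at ha hb
  have hk := ha.2
  unfold pvKeep at hk
  rw [List.all_eq_true] at hk
  have : b ∈ List.range' (a+1) (i - (a+1)) := by
    rw [List.mem_range'_1]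
    omega
  simpa using hk b this

theorem popA_spec (nums : List Int) (i : Nat) (l : List Nat) (r : List Int)
    (hp : l.Pairwise (fun a b => nums.getD b 0 < nums.getD a 0))
    (hl : ∀ j ∈ l, j < r.length) :
    (pvPopA nums i l r).1 = l.filter (fun j => decide (nums.getD j 0 < nums.getD i 0))
    ∧ (pvPopA nums i l r).2.length = r.length
    ∧ ∀ m, (pvPopA nums i l r).2.getD m 0 =
        if m ∈ l ∧ nums.getD i 0 ≤ nums.getD m 0 then (i : Int) else r.getD m 0 := by
  induction l generalizing r with
  | nil =>
    refine ⟨rfl, rfl, fun m => ?_⟩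
    simp [pvPopA]
  | cons t rest ih =>
    have hpt := List.pairwise_cons.mp hp
    by_cases hc : nums.getD i 0 ≤ nums.getD t 0
    · have ht : t < r.length := hl t List.mem_cons_self
      have htrest : t ∉ rest := fun hmem => absurd (hpt.1 t hmem) (by simp)
      have hrec := ih (r.set t (i : Int)) hpt.2
        (fun j hj => by rw [List.length_set]; exact hl j (List.mem_cons_of_mem _ hj))
      have hun : pvPopA nums i (t :: rest) r = pvPopA nums i rest (r.set t (i : Int)) := by
        rw [show pvPopA nums i (t :: rest) r
            = if nums.getD i 0 ≤ nums.getD t 0 then pvPopA nums i rest (r.set t (i : Int))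
              else (t :: rest, r) from rfl, if_pos hc]
      rw [hun]
      refine ⟨?_, ?_, ?_⟩
      · rw [hrec.1, List.filter_cons,
          decide_eq_false (show ¬ nums.getD t 0 < nums.getD i 0 by omega)]
        simp
      · rw [hrec.2.1, List.length_set]
      · intro m
        rw [hrec.2.2 m]
        by_cases hmr : m ∈ rest ∧ nums.getD i 0 ≤ nums.getD m 0
        · rw [if_pos hmr, if_pos ⟨List.mem_cons_of_mem _ hmr.1, hmr.2⟩]
        · rw [if_neg hmr]
          by_cases hmt : m = t
          · subst hmt
            rw [if_pos ⟨List.mem_cons_self, hc⟩]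
            rw [List.getD_eq_getElem _ _ (by simpa using ht)]
            simp
          · have : (r.set t (i : Int)).getD m 0 = r.getD m 0 := by
              simp [List.getD_eq_getElem?_getD, List.getElem?_set_ne (Ne.symm hmt)]
            rw [this, if_neg]
            rintro ⟨hmem, hle⟩
            rcases List.mem_cons.mp hmem with h | h
            · exact hmt h
            · exact hmr ⟨h, hle⟩
    · have hun : pvPopA nums i (t :: rest) r = (t :: rest, r) := by
        rw [show pvPopA nums i (t :: rest) r
            = if nums.getD i 0 ≤ nums.getD t 0 then pvPopA nums i rest (r.set t (i : Int))
              else (t :: rest, r) from rfl, if_neg hc]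
      rw [hun]
      have hsmall : ∀ m ∈ t :: rest, nums.getD m 0 < nums.getD i 0 := by
        intro m hm
        rcases List.mem_cons.mp hm with h | h
        · subst h; omega
        · have := hpt.1 m h; omega
      refine ⟨?_, rfl, fun m => ?_⟩
      · rw [List.filter_eq_self.mpr]
        intro a ha
        exact decide_eq_true (hsmall a ha)
      · rw [if_neg]
        rintro ⟨hmem, hle⟩
        exact absurd (hsmall m hmem) (by omega)

theorem stack_succ (nums : List Int) (i : Nat) :
    pvStack nums (i+1) =
      i :: (pvStack nums i).filter (fun j => decide (nums.getD j 0 < nums.getD i 0)) := by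
  unfold pvStack
  rw [List.filter_reverse]
  rw [List.range_succ, List.filter_append]
  have hki : pvKeep nums (i+1) i = true := by
    unfold pvKeep
    simp
  have hstep : (List.range i).filter (pvKeep nums (i+1)) =
      ((List.range i).filter (pvKeep nums i)).filter
        (fun j => decide (nums.getD j 0 < nums.getD i 0)) := by
    rw [List.filter_filter]
    apply List.filter_congr
    intro j hj
    rw [List.mem_range] at hj
    rw [keep_succ nums hj, Bool.and_comm]
  rw [hstep, List.filter_cons, hki]
  simp

theorem find_keep_aux (nums : List Int) (i : Nat) :
    ∀ c ≤ i, (∀ k, c ≤ k → k < i → nums.getD i 0 ≤ nums.getD k 0) →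
      (List.range c).reverse.find? (fun j => decide (nums.getD j 0 < nums.getD i 0)) =
      (List.range c).reverse.find?
        (fun j => pvKeep nums i j && decide (nums.getD j 0 < nums.getD i 0)) := by
  intro c
  induction c with
  | zero => intro _ _; rfl
  | succ c ih =>
    intro hc H
    rw [List.range_succ, List.reverse_append]
    simp only [List.reverse_singleton, List.singleton_append, List.find?]
    by_cases hp : nums.getD c 0 < nums.getD i 0
    · have hkc : pvKeep nums i c = true := by
        unfold pvKeep
        rw [List.all_eq_true]
        intro k hk
        rw [List.mem_range'_1] at hk
        have := H k (by omega) (by omega)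
        simp only [decide_eq_true_eq]
        omega
      rw [decide_eq_true hp, hkc]
      rfl
    · rw [decide_eq_false hp]
      simp only [Bool.and_false]
      exact ih (by omega) (fun k hk1 hk2 => by
        by_cases hkc : k = c
        · subst hkc; omega
        · exact H k (by omega) hk2)

theorem head?_filter {α : Type} (p : α → Bool) (l : List α) :
    (l.filter p).head? = l.find? p := by
  induction l with
  | nil => rfl
  | cons a l ih => by_cases h : p a <;> simp [List.filter, List.find?, h, ih]

theorem getD_set_self (l : List Int) (n : Nat) (v : Int) (h : n < l.length) :
    (l.set n v).getD n 0 = v := by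
  rw [List.getD_eq_getElem _ _ (by simpa using h)]
  simp

theorem getD_set_ne (l : List Int) (n m : Nat) (v : Int) (h : n ≠ m) :
    (l.set n v).getD m 0 = l.getD m 0 := by
  simp [List.getD_eq_getElem?_getD, List.getElem?_set_ne h]

theorem scan_stack_head (nums : List Int) (i : Nat) :
    ((pvStack nums i).filter (fun j => decide (nums.getD j 0 < nums.getD i 0))).head? =
      (List.range i).reverse.find? (fun j => decide (nums.getD j 0 < nums.getD i 0)) := by
  rw [head?_filter]
  unfold pvStack
  rw [← List.filter_reverse, find?_filter']
  exact (find_keep_aux nums i i (le_refl i) (fun k hk1 hk2 => absurd hk2 (by omega))).symm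

theorem pvL_succ_ne (nums : List Int) (i m : Nat) (hne : m ≠ i) :
    pvL nums (i+1) m = pvL nums i m := by
  unfold pvL
  by_cases h : m < i
  · rw [if_pos h, if_pos (by omega)]
  · rw [if_neg h, if_neg (by omega)]

theorem pvL_succ_self (nums : List Int) (i : Nat) :
    pvL nums (i+1) i =
      (match (List.range i).reverse.find? (fun j => decide (nums.getD j 0 < nums.getD i 0)) with
       | some t => (t : Int) | none => -1) := by
  unfold pvL
  rw [if_pos (by omega), scanLt_eq]

theorem pvR_succ (nums : List Int) (i m : Nat) :
    pvR nums (i+1) m =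
      if m ∈ pvStack nums i ∧ nums.getD i 0 ≤ nums.getD m 0 then (i : Int)
      else pvR nums i m := by
  by_cases hm : m < i
  · have h1 : (i+1) - (m+1) = (i - (m+1)) + 1 := by omega
    have h2 : (m+1) + (i - (m+1)) = i := by omega
    unfold pvR
    rw [h1, List.range'_1_concat, h2, scanLe_eq, scanLe_eq, List.find?_append]
    rcases hfind : (List.range' (m+1) (i-(m+1))).find?
        (fun j => decide (nums.getD j 0 ≤ nums.getD m 0)) with _ | j
    · have hkeep : pvKeep nums i m = true := by
        unfold pvKeep
        rw [List.all_eq_true]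
        intro k hk
        have := List.find?_eq_none.mp hfind k hk
        simp only [decide_eq_true_eq] at this ⊢
        omega
      have hmem : m ∈ pvStack nums i := (mem_stack nums i m).mpr ⟨hm, hkeep⟩
      by_cases hle : nums.getD i 0 ≤ nums.getD m 0
      · rw [if_pos ⟨hmem, hle⟩,
          List.find?_cons_of_pos (p := fun j => decide (nums.getD j 0 ≤ nums.getD m 0)) (l := []) (decide_eq_true hle)]
        rfl
      · rw [if_neg (by rintro ⟨_, h⟩; exact hle h),
          List.find?_cons_of_neg (p := fun j => decide (nums.getD j 0 ≤ nums.getD m 0)) (l := []) (by simpa using hle)]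
        rfl
    · have hnk : ¬ (m ∈ pvStack nums i ∧ nums.getD i 0 ≤ nums.getD m 0) := by
        rintro ⟨hmem, _⟩
        have hkeep := ((mem_stack nums i m).mp hmem).2
        unfold pvKeep at hkeep
        rw [List.all_eq_true] at hkeep
        have hj1 := List.find?_some hfind
        have hj2 := hkeep j (List.mem_of_find?_eq_some hfind)
        simp only [decide_eq_true_eq] at hj1 hj2
        omega
      rw [if_neg hnk]
      simp
  · have hnot : m ∉ pvStack nums i := fun h => absurd ((mem_stack nums i m).mp h).1 hm
    rw [if_neg (by rintro ⟨h, _⟩; exact hnot h)]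
    unfold pvR
    rw [show (i+1) - (m+1) = i - (m+1) by omega]

theorem loop_inv (nums : List Int) :
    ∀ i, i ≤ nums.length →
      (List.range i).foldl (pvStepA nums)
        ([], List.replicate nums.length (-1 : Int),
             List.replicate nums.length (nums.length : Int)) =
      (pvStack nums i,
       (List.range nums.length).map (pvL nums i),
       (List.range nums.length).map (pvR nums i)) := by
  intro i
  induction i with
  | zero =>
    intro _
    simp only [List.range_zero, List.foldl_nil, Prod.mk.injEq]
    refine ⟨rfl, ?_, ?_⟩
    · apply list_eq_of_getD
      · simp
      · intro m
        rw [map_range_getD]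
        by_cases h : m < nums.length
        · rw [if_pos h]
          unfold pvL
          rw [if_neg (by omega), List.getD_eq_getElem _ _ (by simpa using h)]
          simp
        · rw [if_neg h, List.getD_eq_default _ _ (by simpa using h)]
    · apply list_eq_of_getD
      · simp
      · intro m
        rw [map_range_getD]
        by_cases h : m < nums.length
        · rw [if_pos h]
          unfold pvR
          rw [Nat.zero_sub, List.getD_eq_getElem _ _ (by simpa using h)]
          simp [pvScanLe]
        · rw [if_neg h, List.getD_eq_default _ _ (by simpa using h)]
  | succ i ih =>
    intro hi
    have hile : i ≤ nums.length := by omega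
    have hin : i < nums.length := by omega
    rw [List.range_succ, List.foldl_append, ih hile, List.foldl_cons, List.foldl_nil]
    have hlen : ((List.range nums.length).map (pvR nums i)).length = nums.length := by simp
    have hl : ∀ j ∈ pvStack nums i,
        j < ((List.range nums.length).map (pvR nums i)).length := by
      intro j hj
      have := ((mem_stack nums i j).mp hj).1
      omega
    have hP := popA_spec nums i (pvStack nums i) _ (pairwise_stack nums i) hl
    rw [show pvStepA nums
        (pvStack nums i, (List.range nums.length).map (pvL nums i),
         (List.range nums.length).map (pvR nums i)) i =
      (i :: (pvPopA nums i (pvStack nums i) ((List.range nums.length).map (pvR nums i))).1,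
       (match (pvPopA nums i (pvStack nums i) ((List.range nums.length).map (pvR nums i))).1 with
        | t :: _ => ((List.range nums.length).map (pvL nums i)).set i (t : Int)
        | [] => (List.range nums.length).map (pvL nums i)),
       (pvPopA nums i (pvStack nums i) ((List.range nums.length).map (pvR nums i))).2)
      from rfl]
    rw [hP.1]
    simp only [Prod.mk.injEq]
    refine ⟨(stack_succ nums i).symm, ?_, ?_⟩
    · -- left component
      rcases hfil : (pvStack nums i).filter
          (fun j => decide (nums.getD j 0 < nums.getD i 0)) with _ | ⟨t, rest⟩
      · -- no smaller element: left unchanged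
        have hfind : (List.range i).reverse.find?
            (fun j => decide (nums.getD j 0 < nums.getD i 0)) = none := by
          rw [← scan_stack_head, hfil]; rfl
        apply list_eq_of_getD _ _ (by simp)
        intro m
        rw [map_range_getD, map_range_getD]
        by_cases h : m < nums.length
        · rw [if_pos h, if_pos h]
          by_cases hmi : m = i
          · subst hmi
            rw [pvL_succ_self, hfind]
            unfold pvL
            rw [if_neg (by omega)]
          · rw [pvL_succ_ne nums i m hmi]
        · rw [if_neg h, if_neg h]
      · -- left[i] := top of stack
        have hfind : (List.range i).reverse.find?
            (fun j => decide (nums.getD j 0 < nums.getD i 0)) = some t := by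
          rw [← scan_stack_head, hfil]; rfl
        apply list_eq_of_getD _ _ (by simp [List.length_set])
        intro m
        rw [map_range_getD]
        by_cases hmi : m = i
        · subst hmi
          rw [if_pos hin, pvL_succ_self, hfind,
            getD_set_self _ _ _ (by simpa using hin)]
        · rw [getD_set_ne _ _ _ _ (Ne.symm hmi), map_range_getD]
          by_cases h : m < nums.length
          · rw [if_pos h, if_pos h, pvL_succ_ne nums i m hmi]
          · rw [if_neg h, if_neg h]
    · -- right component
      apply list_eq_of_getD _ _ (by rw [hP.2.1, hlen]; simp)
      intro m
      rw [hP.2.2 m, map_range_getD]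
      by_cases h : m < nums.length
      · rw [if_pos h, map_range_getD, if_pos h, pvR_succ]
      · have hnot : ¬ (m ∈ pvStack nums i ∧ nums.getD i 0 ≤ nums.getD m 0) := by
          rintro ⟨hmem, _⟩
          have := ((mem_stack nums i m).mp hmem).1
          omega
        rw [if_neg hnot, if_neg h, map_range_getD, if_neg h]

-- ===== VERDICT (by name: the statement is the Claim_ definition above) =====
theorem min_range_spec : Claim_equal_min_range := by
  intro nums _
  show min_range nums = min_range_alt nums
  have h := loop_inv nums nums.length (le_refl _)
  simp only [min_range, h, min_range_alt, Prod.mk.injEq]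
  constructor
  · apply List.map_congr_left
    intro j hj
    simp only [List.mem_range] at hj
    simp [pvL, hj]
  · rfl
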